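-- pv_equiv track=rewrite | github.com/gtamb/concord4 | concord4.py | __get_right
-- ===== SOURCE A (Python) =====
-- def __get_right(word_list, index, index_num):
--     """
--     Get the right side from the index word to the right boundary
--     PARAMETERS: word_list - list of words in the sentence
--             index - the string of th eindexed word
--     RETURNS: a string of the right side of the indexed word inclusing the indexed word
--     """
--
--
--     right_max_len = 31 - len(index)
--
--     cur_right_len = 0
--     #start the string with the index word already
--     right_string = index
--
--
--     #adds words including the indexed word to right string
--     for word in word_list[index_num +1:]:
--
--         if (cur_right_len + len(word) + 1) <= right_max_len:
--
--
--             right_string = right_string +  " " + word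
--
--             cur_right_len = cur_right_len + len(word) + 1
--         else:
--             break
--
--     return right_string
-- ===== SOURCE B (Python) =====
-- def __get_right(word_list, index, index_num):
--     tail = word_list[index_num + 1:]
--     sums = []
--     total = 0
--     for word in tail:
--         total += len(word) + 1
--         sums.append(total)
--     cutoff = len([s for s in sums if s <= 31 - len(index)])
--     return " ".join([index] + tail[:cutoff])
-- ===== Notes on version B (the rewrite author's own statement) =====
-- stated objective: alternative
-- what changed: B replaces A's stateful running-total loop with early break and repeated string concatenation by a prefix-sum table over the tail, a count of the sums within the 31-character budget (valid because sums are strictly increasing), and a single ' '.join of the fitting prefix.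
import Mathlib
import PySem

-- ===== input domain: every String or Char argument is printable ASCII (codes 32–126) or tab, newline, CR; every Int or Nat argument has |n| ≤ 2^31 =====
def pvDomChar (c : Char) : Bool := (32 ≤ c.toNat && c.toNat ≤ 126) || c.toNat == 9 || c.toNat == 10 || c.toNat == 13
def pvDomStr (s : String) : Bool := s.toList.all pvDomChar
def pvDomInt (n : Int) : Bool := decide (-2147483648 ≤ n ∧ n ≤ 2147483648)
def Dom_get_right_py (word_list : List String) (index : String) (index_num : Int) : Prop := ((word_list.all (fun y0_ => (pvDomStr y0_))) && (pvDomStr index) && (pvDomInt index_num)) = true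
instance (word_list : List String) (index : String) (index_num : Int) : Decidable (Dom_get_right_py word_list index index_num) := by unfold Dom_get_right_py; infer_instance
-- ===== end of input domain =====

-- B change, in one line: prefix-sum table over the tail + count of sums within budget + one ' '.join, instead of A's break-loop with repeated concatenation; objective: alternative decomposition (same cost class).

-- ===== PORT A =====
-- A's for-loop with break: structural recursion over the same state (right_string as List Char, cur_right_len)
def grGoA (maxLen : Int) (ws : List String) (rs : List Char) (cur : Int) : List Char :=
  match ws with
  | [] => rs
  | w :: ws' =>
    if cur + (w.toList.length : Int) + 1 ≤ maxLen then
      grGoA maxLen ws' (rs ++ ' ' :: w.toList) (cur + (w.toList.length : Int) + 1)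
    else rs

def get_right_py (word_list : List String) (index : String) (index_num : Int) : String :=
  String.ofList (grGoA (31 - (index.toList.length : Int))
    (PySem.List.slice word_list (some (index_num + 1)) none) index.toList 0)

-- ===== PORT B =====
-- Source B's prefix-sum loop (total += len(word)+1; sums.append(total)) as the obvious structural recursion
def grSumsB (total : Int) (ws : List String) : List Int :=
  match ws with
  | [] => []
  | w :: ws' => (total + (w.toList.length : Int) + 1) :: grSumsB (total + (w.toList.length : Int) + 1) ws'

def get_right_py_alt (word_list : List String) (index : String) (index_num : Int) : String :=
  let tail := PySem.List.slice word_list (some (index_num + 1)) none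
  let sums := grSumsB 0 tail
  let cutoff := (sums.filter (fun s => s ≤ 31 - (index.toList.length : Int))).length
  PySem.Str.join " " (index :: tail.take cutoff)

-- ===== PRECONDITION & SPEC =====
def Spec_get_right_py (word_list : List String) (index : String) (index_num : Int) (out : String) : Prop := out = get_right_py_alt word_list index index_num
instance (word_list : List String) (index : String) (index_num : Int) (out : String) : Decidable (Spec_get_right_py word_list index index_num out) := by unfold Spec_get_right_py; infer_instance

-- ===== CLAIM (what is proved, stated in full; the proofs are below) =====
def Claim_equal_get_right_py : Prop := ∀ (word_list : List String) (index : String) (index_num : Int), Dom_get_right_py word_list index index_num → Spec_get_right_py word_list index index_num (get_right_py word_list index index_num)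

-- ===== LEMMAS AND PROOFS =====

-- every prefix sum with base c is strictly above c
theorem grSumsB_gt (ws : List String) (c : Int) : ∀ s ∈ grSumsB c ws, c < s := by
  induction ws generalizing c with
  | nil => simp [grSumsB]
  | cons w ws' ih =>
    intro s hs
    simp only [grSumsB, List.mem_cons] at hs
    rcases hs with h | h
    · omega
    · have := ih _ _ h; omega

-- A's loop equals rs ++ the flattened (' ' :: word) blocks of the counted prefix
theorem grGoA_eq (maxLen : Int) (ws : List String) (rs : List Char) (cur : Int) :
    grGoA maxLen ws rs cur =
      rs ++ ((ws.take ((grSumsB cur ws).filter (fun s => s ≤ maxLen)).length).map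
        (fun w => ' ' :: w.toList)).flatten := by
  induction ws generalizing rs cur with
  | nil => simp [grGoA, grSumsB]
  | cons w ws' ih =>
    by_cases h : cur + (w.toList.length : Int) + 1 ≤ maxLen
    · simp only [grGoA, grSumsB, List.filter_cons, decide_eq_true_eq, h, if_pos]
      rw [ih]
      simp [List.append_assoc]
    · have hnil : (grSumsB (cur + (w.toList.length : Int) + 1) ws').filter
          (fun s => s ≤ maxLen) = [] := by
        rw [List.filter_eq_nil_iff]
        intro s hs
        have := grSumsB_gt ws' _ s hs
        simp only [decide_eq_true_eq]
        omega
      have hl : w.toList.length = w.length := by simp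
      have h1 : ¬ (cur + (w.length : Int) < maxLen) := by omega
      have h2 : ¬ (cur + (w.length : Int) + 1 ≤ maxLen) := by omega
      rw [hl] at hnil
      simp [grGoA, grSumsB, h2, hnil]

-- ' '.join (idx :: parts) on the char-list side
theorem join_space_cons (idx : List Char) (parts : List (List Char)) :
    PySem.Chars.join [' '] (idx :: parts) = idx ++ (parts.map (fun w => ' ' :: w)).flatten := by
  induction parts generalizing idx with
  | nil => simp [PySem.Chars.join_singleton]
  | cons p ps ih =>
    rw [PySem.Chars.join_cons_cons, ih]
    simp [List.append_assoc]

-- ' '.join on the String side, as ofList of the flattened blocks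
theorem join_space_str (idx : String) (parts : List String) :
    PySem.Str.join " " (idx :: parts) =
      String.ofList (idx.toList ++ (parts.map (fun w => ' ' :: w.toList)).flatten) := by
  refine Eq.trans String.ofList_toList.symm ?_
  congr 1
  rw [PySem.Str.toList_join]
  simp only [List.map_cons]
  rw [show (" " : String).toList = [' '] from rfl, join_space_cons, List.map_map]
  rfl

-- ===== VERDICT (by name: the statement is the Claim_ definition above) =====
theorem get_right_py_spec : Claim_equal_get_right_py := by
  intro word_list index index_num _
  unfold Spec_get_right_py get_right_py get_right_py_alt
  rw [grGoA_eq, join_space_str]
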